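-- pv_equiv track=rewrite | github.com/Artem-aleks/list_easy | ft_rshift_list.py | ft_rshift_list
-- ===== SOURCE A (Python) =====
-- def ft_len(v):
--     b = 0
--     for i in v:
--         b += 1
--     return b
--
-- def ft_rshift_list(num):
--     s = 1
--     x = 0
--     while x < ft_len(num) - 1:
--         c = num[-s]
--         num[-s] = num[-(s + 1)]
--         num[-(s + 1)] = c
--         x += 1
--         s += 1
--     return num
-- ===== SOURCE B (Python) =====
-- def ft_rshift_list(num):
--     if num:
--         num.insert(0, num.pop())
--     return num
-- ===== Notes on version B (the rewrite author's own statement) =====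
-- stated objective: simpler
-- what changed: Replaces the adjacent-swap bubble loop (with its hand-rolled length function and negative-index arithmetic) by a single pop of the last element reinserted at index 0; both mutate the list in place and return it.
import Mathlib
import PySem

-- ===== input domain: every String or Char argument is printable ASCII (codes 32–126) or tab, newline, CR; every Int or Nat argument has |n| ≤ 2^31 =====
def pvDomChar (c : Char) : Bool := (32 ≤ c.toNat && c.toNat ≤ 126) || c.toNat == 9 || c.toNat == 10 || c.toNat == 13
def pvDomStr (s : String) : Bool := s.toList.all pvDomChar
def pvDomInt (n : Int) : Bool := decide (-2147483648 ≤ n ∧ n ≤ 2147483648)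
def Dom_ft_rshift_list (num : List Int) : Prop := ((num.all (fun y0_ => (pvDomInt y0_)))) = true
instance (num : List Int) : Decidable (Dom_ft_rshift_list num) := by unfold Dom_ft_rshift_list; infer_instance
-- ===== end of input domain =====

-- B replaces A's adjacent-swap bubble loop by a single pop-last + insert-at-0 ('simpler');
-- both Pythons mutate the argument list in place to the same final contents and return it,
-- so the return-value equivalence proved here also describes the side effect.

-- ===== PORT A =====
-- ft_len: hand-rolled length (a Python int)
def ftLen (v : List Int) : Int := v.foldl (fun b _ => b + 1) 0

-- length is invariant under the two assignments of one iteration (cited by decreasing_by)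
theorem pvLoop_len (num : List Int) (s : Int) (a b : Int) :
    ((PySem.List.pySetD (PySem.List.pySetD num (-s) a) (-(s + 1)) b)).length = num.length := by
  simp [PySem.List.length_pySetD]

theorem ftLen_eq (v : List Int) : ftLen v = (v.length : Int) := by
  have : ∀ (v : List Int) (b : Int), v.foldl (fun b _ => b + 1) b = b + v.length := by
    intro v; induction v with
    | nil => simp
    | cons h t ih => intro b; simp [List.foldl, ih]; omega
  simpa [ftLen] using this v 0

-- the while loop, state (num, x, s); the temporary c is the first pyGetD. While the guard
-- holds the indices -s and -(s+1) are in range, so the total forms pyGetD/pySetD compute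
-- exactly what Python's num[-s] / num[-s] = … do there.
def rshiftLoop (num : List Int) (x s : Int) : List Int :=
  if h : x < ftLen num - 1 then
    rshiftLoop
      (PySem.List.pySetD
        (PySem.List.pySetD num (-s) (PySem.List.pyGetD num (-(s + 1)) 0))
        (-(s + 1)) (PySem.List.pyGetD num (-s) 0))
      (x + 1) (s + 1)
  else num
termination_by (ftLen num - 1 - x).toNat
decreasing_by
  simp only [pvLoop_len, ftLen_eq] at *
  omega

def ft_rshift_list (num : List Int) : List Int := rshiftLoop num 0 1

-- ===== PORT B =====
def ft_rshift_list_alt (num : List Int) : List Int :=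
  if num = [] then num
  else
    match PySem.List.pop? num (-1) with
    | some (v, rest) => PySem.List.insert rest 0 v
    | none => num  -- unreachable: num ≠ []

-- ===== PRECONDITION & SPEC =====
def Spec_ft_rshift_list (num : List Int) (out : List Int) : Prop := out = ft_rshift_list_alt num
instance (num : List Int) (out : List Int) : Decidable (Spec_ft_rshift_list num out) := by unfold Spec_ft_rshift_list; infer_instance

-- ===== CLAIM (what is proved, stated in full; the proofs are below) =====
def Claim_equal_ft_rshift_list : Prop := ∀ (num : List Int), Dom_ft_rshift_list num → Spec_ft_rshift_list num (ft_rshift_list num)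

-- ===== LEMMAS AND PROOFS =====

-- negative-index pyGetD / pySetD as positions from the front
theorem pyGetD_neg (xs : List Int) (k : Nat) (h1 : 0 < k) (h2 : k ≤ xs.length) (d : Int) :
    PySem.List.pyGetD xs (-(k : Int)) d = xs.getD (xs.length - k) d := by
  unfold PySem.List.pyGetD
  rw [PySem.List.pyGet?_neg_natCast xs k h1 h2]
  simp [List.getD]

theorem pySetD_neg (xs : List Int) (k : Nat) (h1 : 0 < k) (h2 : k ≤ xs.length) (v : Int) :
    PySem.List.pySetD xs (-(k : Int)) v = xs.set (xs.length - k) v := by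
  unfold PySem.List.pySetD PySem.List.pySet? PySem.List.pyIdx?
  rw [if_neg (by omega), if_pos (by omega)]
  simp

-- the invariant: with k iterations remaining (length = x + k + 1, s = x + 1) the loop
-- bubbles the element at position k to the front of the first k + 1 positions
theorem rshiftLoop_spec (k : Nat) : ∀ (m : List Int) (x : Nat),
    m.length = x + k + 1 → rshiftLoop m (x : Int) ((x : Int) + 1) = m.getD k 0 :: m.eraseIdx k := by
  induction k with
  | zero =>
    intro m x hm
    rw [rshiftLoop, dif_neg (by rw [ftLen_eq, hm]; push_cast; omega)]
    cases m with
    | nil => simp at hm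
    | cons a t =>
      simp at hm ⊢
      try omega
  | succ k ih =>
    intro m x hm
    rw [rshiftLoop, dif_pos (by rw [ftLen_eq, hm]; push_cast; omega)]
    rw [show (-(((x : Nat) : Int) + 1)) = (-(((x + 1 : Nat)) : Int)) by push_cast; ring,
        show (-(((x : Nat) : Int) + 1 + 1)) = (-(((x + 2 : Nat)) : Int)) by push_cast; ring]
    rw [show ((((x : Nat)) : Int) + 1 + 1) = ((((x + 1 : Nat)) : Int) + 1) by push_cast; ring]
    rw [show ((((x : Nat)) : Int) + 1) = (((x + 1 : Nat)) : Int) by push_cast; ring]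
    rw [pyGetD_neg m (x + 1) (by omega) (by omega)]
    rw [pyGetD_neg m (x + 2) (by omega) (by omega)]
    rw [pySetD_neg m (x + 1) (by omega) (by omega)]
    have hlen : (m.set (m.length - (x + 1)) (m.getD (m.length - (x + 2)) 0)).length = m.length := by
      simp
    rw [pySetD_neg _ (x + 2) (by omega) (by rw [hlen]; omega)]
    rw [hlen]
    have e1 : m.length - (x + 1) = k + 1 := by omega
    have e2 : m.length - (x + 2) = k := by omega
    rw [e1, e2]
    set m2 := (m.set (k + 1) (m.getD k 0)).set k (m.getD (k + 1) 0) with hm2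
    have hm2len : m2.length = (x + 1) + k + 1 := by simp [hm2]; omega
    rw [ih m2 (x + 1) hm2len]
    have hk1 : k + 1 < m.length := by omega
    have hk : k < m.length := by omega
    refine congrArg₂ List.cons ?_ ?_
    · -- heads: m2.getD k 0 = m.getD (k + 1) 0
      simp [hm2, List.getD, hk, hk1]
    · -- tails: m2.eraseIdx k = m.eraseIdx (k + 1)
      rw [hm2, List.eraseIdx_eq_take_drop_succ, List.eraseIdx_eq_take_drop_succ]
      have ht : ((m.set (k + 1) (m.getD k 0)).set k (m.getD (k + 1) 0)).take k
          = m.take k := by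
        refine List.ext_getElem (by simp) ?_
        intro i h1 h2
        simp only [List.length_take, List.length_set, lt_min_iff] at h1
        simp [List.getElem_set]
        omega
      have hd : ((m.set (k + 1) (m.getD k 0)).set k (m.getD (k + 1) 0)).drop (k + 1)
          = m.getD k 0 :: m.drop (k + 2) := by
        have h1 : (((m.set (k + 1) (m.getD k 0)).set k (m.getD (k + 1) 0))).drop (k + 1) =
            (((m.set (k + 1) (m.getD k 0)).set k (m.getD (k + 1) 0)))[k + 1]'(by simp; omega)
              :: (((m.set (k + 1) (m.getD k 0)).set k (m.getD (k + 1) 0))).drop (k + 2) := by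
          rw [List.drop_eq_getElem_cons (by simp; omega)]
        rw [h1]
        refine congrArg₂ List.cons ?_ ?_
        · simp [List.getD, List.getElem?_eq_getElem hk]
        · simp only [List.drop_set_of_lt (show k < k + 2 by omega),
                     List.drop_set_of_lt (show k + 1 < k + 2 by omega)]
      rw [ht, hd, List.take_succ_eq_append_getElem hk, List.append_assoc,
          List.getD_eq_getElem?_getD, List.getElem?_eq_getElem hk]
      norm_num

-- ===== VERDICT (by name: the statement is the Claim_ definition above) =====
theorem ft_rshift_list_spec : Claim_equal_ft_rshift_list := by
  intro num _
  unfold Spec_ft_rshift_list ft_rshift_list ft_rshift_list_alt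
  by_cases h : num = []
  · subst h
    rw [rshiftLoop, dif_neg (by decide)]
    simp
  · have hlen : num.length = 0 + (num.length - 1) + 1 := by
      have := List.length_pos_iff.mpr h; omega
    have hspec := rshiftLoop_spec (num.length - 1) num 0 hlen
    norm_num at hspec
    rw [hspec, if_neg h]
    have hrep : num.dropLast ++ [num.getLast h] = num := List.dropLast_append_getLast h
    have hpop : PySem.List.pop? num (-1) = some (num.getLast h, num.dropLast) := by
      conv_lhs => rw [← hrep]
      exact PySem.List.pop?_last _ _
    rw [hpop]
    show _ = PySem.List.insert num.dropLast 0 (num.getLast h)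
    rw [PySem.List.insert_zero]
    refine congrArg₂ List.cons ?_ ?_
    · -- getD (n-1) = getLast
      have hn : num.length - 1 < num.length := by
        have := List.length_pos_iff.mpr h; omega
      simp [List.getElem?_eq_getElem hn, List.getLast_eq_getElem]
    · rfl
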